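-- pv_equiv track=rewrite | github.com/saman-akhtar/NeetCode150 | Backtracking/N Digit numbers with digits in increasing order.py | increasingNumbers
-- ===== SOURCE A (Python) =====
-- from typing import List
--
-- def increasingNumbers(n : int) -> List[int]:
--     # code here
--     res = []
--     if n== 1:
--         return [i for i in range(10)]
--     def solve(n, no,prev):
--         # base case
--         if n ==0 :
--             res.append(no)
--             return;
--
--         for i in range(prev+1,10):
--
--                     new = no*10 + i
--                     solve(n-1, new,i)
--
--     solve(n, 0, 0)
--     return res
-- ===== SOURCE B (Python) =====
-- def increasingNumbers(n):
--     # Bitmask enumeration: each strictly-increasing digit string over 1..9 is a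
--     # subset of {1..9}; pick subsets of size n and sort the resulting numbers.
--     if n == 1:
--         return [i for i in range(10)]
--     nums = []
--     for mask in range(512):
--         num = 0
--         count = 0
--         for d in range(1, 10):
--             if (mask >> (d - 1)) & 1:
--                 num = num * 10 + d
--                 count += 1
--         if count == n:
--             nums.append(num)
--     return sorted(nums)
-- ===== Notes on version B (the rewrite author's own statement) =====
-- stated objective: alternative
-- what changed: Replaces A's recursive backtracking over digit prefixes with a flat bitmask enumeration of all subsets of the digits one through nine (a subset of size n is exactly a strictly increasing digit string), followed by one sort.
import Mathlib
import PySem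

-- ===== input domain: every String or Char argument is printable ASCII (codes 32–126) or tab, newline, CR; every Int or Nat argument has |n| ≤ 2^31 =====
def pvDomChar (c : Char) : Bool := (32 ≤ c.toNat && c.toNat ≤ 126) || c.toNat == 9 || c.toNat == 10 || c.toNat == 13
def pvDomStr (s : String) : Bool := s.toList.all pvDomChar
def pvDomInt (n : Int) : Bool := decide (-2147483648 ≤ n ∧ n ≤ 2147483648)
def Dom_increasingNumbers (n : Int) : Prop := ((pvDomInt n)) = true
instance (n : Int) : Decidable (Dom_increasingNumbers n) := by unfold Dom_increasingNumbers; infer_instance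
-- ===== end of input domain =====

-- B replaces A's recursive backtracking by a bitmask enumeration of digit subsets of {1..9}
-- plus a final sort (objective: alternative algorithm of similar cost).

-- ===== PORT A =====
-- A's inner recursive `solve` (res threaded as an accumulator); the Python for-loop
-- `for i in range(prev+1,10)` is the foldl over List.range' (prev+1) (10-(prev+1)).
-- `fuel` is only a totality device: the recursion depth is bounded by 10 because prev
-- strictly increases up to 9, so with fuel = 10 the fuel-0 branch is never reached.
def pvSolve (fuel : Nat) (n no : Int) (prev : Nat) (res : List Int) : List Int :=
  match fuel with
  | 0 => res
  | f + 1 =>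
    if n = 0 then res ++ [no]
    else (List.range' (prev + 1) (10 - (prev + 1))).foldl
        (fun r (i : Nat) => pvSolve f (n - 1) (no * 10 + (i : Int)) i r) res

def increasingNumbers (n : Int) : List Int :=
  if n = 1 then (List.range 10).map (fun i => (i : Int))
  else pvSolve 10 n 0 0 []
-- ===== PORT B =====
-- inner loop of Source B: for d in range(1,10): if (mask >> (d-1)) & 1: num = num*10+d; count += 1
def pvMaskDigits (mask : Nat) : Int × Int :=
  (List.range' 1 9).foldl
    (fun p d => if (mask >>> (d - 1)) &&& 1 = 1 then (p.1 * 10 + (d : Int), p.2 + 1) else p)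
    ((0 : Int), (0 : Int))

def increasingNumbers_alt (n : Int) : List Int :=
  if n = 1 then (List.range 10).map (fun i => (i : Int))
  else
    PySem.List.sorted
      ((List.range 512).foldl
        (fun nums mask =>
          let p := pvMaskDigits mask
          if p.2 = n then nums ++ [p.1] else nums) [])
      (fun x => x) false

-- ===== PRECONDITION & SPEC =====
def Spec_increasingNumbers (n : Int) (out : List Int) : Prop := out = increasingNumbers_alt n
instance (n : Int) (out : List Int) : Decidable (Spec_increasingNumbers n out) := by unfold Spec_increasingNumbers; infer_instance

-- ===== CLAIM (what is proved, stated in full; the proofs are below) =====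
def Claim_equal_increasingNumbers : Prop := ∀ (n : Int), Dom_increasingNumbers n → Spec_increasingNumbers n (increasingNumbers n)

-- ===== LEMMAS AND PROOFS =====

theorem foldl_fix {a b : Type} (g : b -> a -> b) (l : List a)
    (h : ∀ i ∈ l, ∀ r, g r i = r) : ∀ res, l.foldl g res = res := by
  induction l with
  | nil => intro res; rfl
  | cons x t ih =>
    intro res
    simp only [List.foldl_cons]
    rw [h x (List.mem_cons_self)]
    exact ih (fun i hi r => h i (List.mem_cons_of_mem _ hi) r) res

-- A returns [] whenever the remaining digit budget can never reach 0.
theorem pvSolve_id (fuel : Nat) : ∀ (n no : Int) (prev : Nat) (res : List Int),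
    n ≠ 0 → (n < 0 ∨ (9 : Int) - prev < n) → pvSolve fuel n no prev res = res := by
  induction fuel with
  | zero => intros; rfl
  | succ f ih =>
    intro n no prev res h0 h
    simp only [pvSolve]
    rw [if_neg h0]
    apply foldl_fix
    intro i hi r
    have hm := List.mem_range'.mp hi
    exact ih (n - 1) (no * 10 + (i : Int)) i r (by omega) (by omega)

theorem pvCount_bounds (mask : Nat) :
    0 ≤ (pvMaskDigits mask).2 ∧ (pvMaskDigits mask).2 ≤ 9 := by
  have key : ∀ (l : List Nat) (p : Int × Int),
      p.2 ≤ (l.foldl (fun p d => if (mask >>> (d - 1)) &&& 1 = 1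
              then (p.1 * 10 + (d : Int), p.2 + 1) else p) p).2 ∧
      (l.foldl (fun p d => if (mask >>> (d - 1)) &&& 1 = 1
              then (p.1 * 10 + (d : Int), p.2 + 1) else p) p).2 ≤ p.2 + l.length := by
    intro l
    induction l with
    | nil => intro p; simp
    | cons d t ih =>
      intro p
      simp only [List.foldl_cons, List.length_cons]
      split
      · have := ih (p.1 * 10 + (d : Int), p.2 + 1)
        constructor <;> [omega; omega]
      · have := ih p
        constructor <;> [omega; omega]
  have := key (List.range' 1 9) ((0 : Int), (0 : Int))
  simp only [List.length_range'] at this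
  exact ⟨by unfold pvMaskDigits; omega, by unfold pvMaskDigits; omega⟩

theorem foldl_no_append (n : Int) (l : List Nat) (acc : List Int)
    (h : ∀ m ∈ l, (pvMaskDigits m).2 ≠ n) :
    l.foldl (fun nums mask =>
        let p := pvMaskDigits mask
        if p.2 = n then nums ++ [p.1] else nums) acc = acc := by
  induction l generalizing acc with
  | nil => rfl
  | cons m t ih =>
    simp only [List.foldl_cons]
    rw [if_neg (h m (List.mem_cons_self))]
    exact ih acc (fun x hx => h x (List.mem_cons_of_mem _ hx))

theorem both_empty (n : Int) (h : ¬ (0 ≤ n ∧ n ≤ 9)) :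
    increasingNumbers n = increasingNumbers_alt n := by
  have hn1 : n ≠ 1 := by omega
  have hn0 : n ≠ 0 := by omega
  unfold increasingNumbers increasingNumbers_alt
  rw [if_neg hn1, if_neg hn1]
  rw [pvSolve_id 10 n 0 0 [] hn0 (by push_cast; omega)]
  rw [foldl_no_append n (List.range 512) []
      (fun m _ => by have := pvCount_bounds m; omega)]
  rfl

-- ===== VERDICT (by name: the statement is the Claim_ definition above) =====
set_option maxRecDepth 10000 in
set_option maxHeartbeats 2000000 in
theorem increasingNumbers_spec : Claim_equal_increasingNumbers := by
  intro n _hd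
  unfold Spec_increasingNumbers
  by_cases h : 0 ≤ n ∧ n ≤ 9
  · obtain ⟨h1, h2⟩ := h
    interval_cases n <;> decide
  · exact both_empty n h
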